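-- pv_equiv track=rewrite | github.com/growbori/Python_TIL | 1차 월말평가/problem07.py | tidy_up_company
-- ===== SOURCE A (Python) =====
-- def tidy_up_company(email_list):
--     Kemail = 0 # 'Koogle'에 해당하는 이메일의 갯수를 세는 함수
--     Jemail = 0 # 'JCloud'에 해당하는 이메일의 갯수를 세는 함수
--     Gemail = 0 # 'GaKao'에 해당하는 이메일의 갯수를 세는 함수
--     Semail = 0 # 'School'에 해당하는 이메일의 갯수를 세는 함수
--     Mmail = 0 # 'Maver'에 해당하는 이메일의 갯수를 세는 함수
--     for i in range(len(email_list)): # 전체 이메일 리스트 길이를 범위로 주어주고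
--         if email_list[i] == 'Koogle': # 만약 email_list안에 있는 i 번째 요소의 값이 'Koogle'과 같다면
--             Kemail += 1 # Kemail에 값을 1 더해준다.
--         elif email_list[i] == 'Maver': # 만약 email_list안에 있는 i 번째 요소의 값이 'Maver'과 같다면
--             Mmail += 1 # Mmail 값을 1 더해준다.
--         elif email_list[i] == 'JCloud': # 이하동일하게 수행한다.
--             Jemail += 1
--         elif email_list[i] == 'GaKao':
--             Gemail += 1
--
--         elif email_list[i] == 'School':
--             Semail += 1 # 여기까지 마치고 나면 각 이메일마다 email_list에 포함된 갯수들이 나타날 것이다.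
--
--     email_summary = {} # 빈 딕셔너리 형태를 하나 만들어주고
--     if 'Koogle' in email_list: # 만약 'Koogle'이 email_list 안에 있다면
--         email_summary['Koogle'] = Kemail # 'koogle' 키 값의 value로 Kemail을 짝지어서 빈 딕셔너리에 넣어준다.
--     if 'JCloud' in email_list: # 만약 'JCloud'이 email_list 안에 있다면
--         email_summary['JCloud'] = Jemail # 'JCloud' 키 값의 value로 Jemail을 짝지어서 빈 딕셔너리에 넣어준다.
--     if 'GaKao' in email_list: # 만약 'GaKao'이 email_list 안에 있다면
--         email_summary['GaKao'] = Gemail # 'GaKao' 키 값의 value로 Gemail을 짝지어서 빈 딕셔너리에 넣어준다.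
--     if 'School' in email_list: # 만약 'School'이 email_list 안에 있다면
--         email_summary['School'] = Semail # 'School' 키 값의 value로 Semail을 짝지어서 빈 딕셔너리에 넣어준다.
--     if 'Maver' in email_list: # 만약 'Maver'이 email_list 안에 있다면
--         email_summary['Maver'] = Mmail # 'Maver' 키 값의 value로 Mmail을 짝지어서 빈 딕셔너리에 넣어준다.
--     return email_summary # email_summary에 채워진 딕셔너리 값들을 확인한다.
-- ===== SOURCE B (Python) =====
-- def tidy_up_company(email_list):
--     email_summary = {}
--     for company in ['Koogle', 'JCloud', 'GaKao', 'School', 'Maver']: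
--         if company in email_list:
--             email_summary[company] = sum(1 for x in email_list if x == company)
--     return email_summary
-- ===== Notes on version B (the rewrite author's own statement) =====
-- stated objective: simpler
-- what changed: B replaces A's indexed pass with five named counters plus five hand-written membership/insert blocks by a single loop over the fixed company list that counts each company with a generator sum and inserts it if present.
import Mathlib
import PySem

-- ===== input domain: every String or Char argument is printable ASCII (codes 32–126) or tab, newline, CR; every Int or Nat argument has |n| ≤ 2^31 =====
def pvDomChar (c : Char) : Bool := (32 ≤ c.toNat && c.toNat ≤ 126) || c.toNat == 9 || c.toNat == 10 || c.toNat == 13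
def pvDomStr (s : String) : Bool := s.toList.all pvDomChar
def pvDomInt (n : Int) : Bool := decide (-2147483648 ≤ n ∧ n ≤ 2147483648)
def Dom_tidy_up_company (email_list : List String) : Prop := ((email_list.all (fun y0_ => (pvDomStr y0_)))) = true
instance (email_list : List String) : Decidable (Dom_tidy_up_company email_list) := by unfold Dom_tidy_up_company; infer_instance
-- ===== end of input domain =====

-- B loops over the five fixed company names and counts each with a generator sum,
-- instead of A's single indexed pass over the emails with five named counters (objective: simpler).

-- ===== PORT A =====
-- the body of A's for-loop: the elif chain updating the five counters
def pvStepA (st : Int × Int × Int × Int × Int) (e : String) : Int × Int × Int × Int × Int :=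
  match st with
  | (k, j, g, s, m) =>
    if e = "Koogle" then (k + 1, j, g, s, m)
    else if e = "Maver" then (k, j, g, s, m + 1)
    else if e = "JCloud" then (k, j + 1, g, s, m)
    else if e = "GaKao" then (k, j, g + 1, s, m)
    else if e = "School" then (k, j, g, s + 1, m)
    else (k, j, g, s, m)

def tidy_up_company (email_list : List String) : List (String × Int) :=
  -- for i in range(len(email_list)): the index is always in range, so pyGetD with default "" is exact
  let st : Int × Int × Int × Int × Int :=
    (PySem.List.pyRange 0 (email_list.length : Int) 1).foldl
      (fun st i => pvStepA st (PySem.List.pyGetD email_list i ""))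
      (0, 0, 0, 0, 0)
  let (kemail, jemail, gemail, semail, mmail) := st
  let d0 : PySem.Dict String Int := PySem.Dict.empty
  let d1 := if email_list.contains "Koogle" then d0.insert "Koogle" kemail else d0
  let d2 := if email_list.contains "JCloud" then d1.insert "JCloud" jemail else d1
  let d3 := if email_list.contains "GaKao" then d2.insert "GaKao" gemail else d2
  let d4 := if email_list.contains "School" then d3.insert "School" semail else d3
  let d5 := if email_list.contains "Maver" then d4.insert "Maver" mmail else d4
  d5.items

-- ===== PORT B =====
-- sum(1 for x in email_list if x == company)
def pvCount (email_list : List String) (company : String) : Int :=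
  ((email_list.filter (fun x => x = company)).map (fun _ => (1 : Int))).sum

def tidy_up_company_alt (email_list : List String) : List (String × Int) :=
  ((["Koogle", "JCloud", "GaKao", "School", "Maver"] : List String).foldl
    (fun d company =>
      if email_list.contains company then d.insert company (pvCount email_list company) else d)
    (PySem.Dict.empty : PySem.Dict String Int)).items

-- ===== PRECONDITION & SPEC =====
def Spec_tidy_up_company (email_list : List String) (out : List (String × Int)) : Prop := out = tidy_up_company_alt email_list
instance (email_list : List String) (out : List (String × Int)) : Decidable (Spec_tidy_up_company email_list out) := by unfold Spec_tidy_up_company; infer_instance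

-- ===== CLAIM (what is proved, stated in full; the proofs are below) =====
def Claim_equal_tidy_up_company : Prop := ∀ (email_list : List String), Dom_tidy_up_company email_list → Spec_tidy_up_company email_list (tidy_up_company email_list)

-- ===== LEMMAS AND PROOFS =====

-- A's counter loop computes, component by component, B's per-company counts.
theorem pvCount_cons (e : String) (t : List String) (c : String) :
    pvCount (e :: t) c = (if e = c then 1 else 0) + pvCount t c := by
  simp only [pvCount, List.filter_cons]
  split <;> simp_all

theorem pvFoldA_eq (l : List String) (k j g s m : Int) :
    l.foldl pvStepA (k, j, g, s, m)
    = (k + pvCount l "Koogle", j + pvCount l "JCloud", g + pvCount l "GaKao",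
       s + pvCount l "School", m + pvCount l "Maver") := by
  induction l generalizing k j g s m with
  | nil => simp [pvCount]
  | cons e t ih =>
    simp only [List.foldl_cons]
    rcases eq_or_ne e "Koogle" with h | hk
    · subst h; simp [pvStepA, ih, pvCount_cons, add_comm, add_left_comm]
    rcases eq_or_ne e "Maver" with h | hm
    · subst h; simp [pvStepA, ih, pvCount_cons, add_comm, add_left_comm]
    rcases eq_or_ne e "JCloud" with h | hj
    · subst h; simp [pvStepA, ih, pvCount_cons, add_comm, add_left_comm]
    rcases eq_or_ne e "GaKao" with h | hg
    · subst h; simp [pvStepA, ih, pvCount_cons, add_comm, add_left_comm]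
    rcases eq_or_ne e "School" with h | hs
    · subst h; simp [pvStepA, ih, pvCount_cons, add_comm, add_left_comm]
    · simp [pvStepA, ih, pvCount_cons, hk, hm, hj, hg, hs]

theorem tidy_up_company_spec' (l : List String) :
    tidy_up_company l = tidy_up_company_alt l := by
  unfold tidy_up_company tidy_up_company_alt
  rw [PySem.List.foldl_pyRange_zero_pyGetD']
  rw [pvFoldA_eq]
  simp [List.foldl]

-- ===== VERDICT (by name: the statement is the Claim_ definition above) =====
theorem tidy_up_company_spec : Claim_equal_tidy_up_company := by
  intro l _
  exact tidy_up_company_spec' l
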